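-- pv_equiv track=rewrite | github.com/Aditya-011/Python | Udemy/encryptor.py | encrytor
-- ===== SOURCE A (Python) =====
-- def encrytor(text):
--     encrypted_text = ""
--     for i in text:
--         if i in "aA":
--             encrypted_text = encrypted_text + str(1)
--         elif i in "bB":
--             encrypted_text = encrypted_text + str(2)
--         elif i in "cC":
--             encrypted_text = encrypted_text + str(3)
--         elif i in "dD":
--             encrypted_text = encrypted_text + str(4)
--         elif i in "eE":
--             encrypted_text = encrypted_text + str(5)
--         elif i in "fF":
--             encrypted_text = encrypted_text + str(6)
--         elif i in "gG":
--             encrypted_text = encrypted_text + str(7)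
--         elif i in "hH":
--             encrypted_text = encrypted_text + str(8)
--         elif i in "iI":
--             encrypted_text = encrypted_text + str(9)
--         elif i in "jJ":
--             encrypted_text = encrypted_text + str(10)
--         elif i in "kK":
--             encrypted_text = encrypted_text + str(11)
--         elif i in "lL":
--             encrypted_text = encrypted_text + str(12)
--         elif i in "mM":
--             encrypted_text = encrypted_text + str(13)
--         elif i in "nN":
--             encrypted_text = encrypted_text + str(14)
--         elif i in "oO":
--             encrypted_text = encrypted_text + str(15)
--         elif i in "pP":
--             encrypted_text = encrypted_text + str(16)
--         elif i in "qQ":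
--             encrypted_text = encrypted_text + str(17)
--         elif i in "rR":
--             encrypted_text = encrypted_text + str(18)
--         elif i in "sS":
--             encrypted_text = encrypted_text + str(19)
--         elif i in "tT":
--             encrypted_text = encrypted_text + str(20)
--         elif i in "uU":
--             encrypted_text = encrypted_text + str(21)
--         elif i in "vV":
--             encrypted_text = encrypted_text + str(22)
--         elif i in "wW":
--             encrypted_text = encrypted_text + str(23)
--         elif i in "xX":
--             encrypted_text = encrypted_text + str(24)
--         elif i in "yY":
--             encrypted_text = encrypted_text + str(25)
--         elif i in "zZ":
--             encrypted_text = encrypted_text + str(26)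
--         elif i in " ":
--             encrypted_text = encrypted_text + str(0)
--
--     return encrypted_text
-- ===== SOURCE B (Python) =====
-- def encrytor(text):
--     parts = []
--     for c in text:
--         o = ord(c)
--         if 65 <= o <= 90:
--             o += 32
--         if 97 <= o <= 122:
--             parts.append(str(o - 96))
--         elif c == ' ':
--             parts.append('0')
--     return ''.join(parts)
-- ===== Notes on version B (the rewrite author's own statement) =====
-- stated objective: simpler
-- what changed: Replaces the 27-branch elif chain and repeated string concatenation with a single arithmetic mapping on the codepoint (case-folded by adding 32) and one final join over a list of parts.
import Mathlib
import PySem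

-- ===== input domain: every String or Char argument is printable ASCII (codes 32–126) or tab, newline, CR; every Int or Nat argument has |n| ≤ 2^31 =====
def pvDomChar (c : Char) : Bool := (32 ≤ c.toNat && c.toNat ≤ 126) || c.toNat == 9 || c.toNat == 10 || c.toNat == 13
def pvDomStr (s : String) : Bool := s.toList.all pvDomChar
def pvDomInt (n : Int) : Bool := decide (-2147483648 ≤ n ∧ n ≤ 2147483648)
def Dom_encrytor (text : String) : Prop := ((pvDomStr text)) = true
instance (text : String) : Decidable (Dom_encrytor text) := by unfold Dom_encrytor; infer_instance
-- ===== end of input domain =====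

-- B replaces A's 27-branch elif chain and repeated concatenation by codepoint arithmetic and a single join (objective: simpler).

-- ===== PORT A =====
-- Per-character branch chain of A, in A's branch order; "" is the fall-through (no elif matched).
def encrytorStepA (i : Char) : String :=
  if i = 'a' ∨ i = 'A' then "1"
  else if i = 'b' ∨ i = 'B' then "2"
  else if i = 'c' ∨ i = 'C' then "3"
  else if i = 'd' ∨ i = 'D' then "4"
  else if i = 'e' ∨ i = 'E' then "5"
  else if i = 'f' ∨ i = 'F' then "6"
  else if i = 'g' ∨ i = 'G' then "7"
  else if i = 'h' ∨ i = 'H' then "8"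
  else if i = 'i' ∨ i = 'I' then "9"
  else if i = 'j' ∨ i = 'J' then "10"
  else if i = 'k' ∨ i = 'K' then "11"
  else if i = 'l' ∨ i = 'L' then "12"
  else if i = 'm' ∨ i = 'M' then "13"
  else if i = 'n' ∨ i = 'N' then "14"
  else if i = 'o' ∨ i = 'O' then "15"
  else if i = 'p' ∨ i = 'P' then "16"
  else if i = 'q' ∨ i = 'Q' then "17"
  else if i = 'r' ∨ i = 'R' then "18"
  else if i = 's' ∨ i = 'S' then "19"
  else if i = 't' ∨ i = 'T' then "20"
  else if i = 'u' ∨ i = 'U' then "21"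
  else if i = 'v' ∨ i = 'V' then "22"
  else if i = 'w' ∨ i = 'W' then "23"
  else if i = 'x' ∨ i = 'X' then "24"
  else if i = 'y' ∨ i = 'Y' then "25"
  else if i = 'z' ∨ i = 'Z' then "26"
  else if i = ' ' then "0"
  else ""

def encrytor (text : String) : String :=
  text.toList.foldl (fun encrypted_text i => encrypted_text ++ encrytorStepA i) ""

-- ===== PORT B =====
-- Source B's loop body: fold to lowercase by arithmetic, then one range test; parts are joined at the end.
def encrytorStepB (c : Char) : List Char :=
  let o := c.toNat
  let o := if 65 ≤ o ∧ o ≤ 90 then o + 32 else o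
  if 97 ≤ o ∧ o ≤ 122 then (PySem.Int.toStr ((o : Int) - 96)).toList
  else if c = ' ' then ['0'] else []

def encrytor_alt (text : String) : String :=
  String.ofList (text.toList.flatMap encrytorStepB)

-- ===== PRECONDITION & SPEC =====
def Spec_encrytor (text : String) (out : String) : Prop := out = encrytor_alt text
instance (text : String) (out : String) : Decidable (Spec_encrytor text out) := by unfold Spec_encrytor; infer_instance

-- ===== CLAIM (what is proved, stated in full; the proofs are below) =====
def Claim_equal_encrytor : Prop := ∀ (text : String), Dom_encrytor text → Spec_encrytor text (encrytor text)

-- ===== LEMMAS AND PROOFS =====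

set_option maxRecDepth 8192 in
theorem encrytor_step_eq_ofNat : ∀ n < 256, encrytorStepA (Char.ofNat n) = String.ofList (encrytorStepB (Char.ofNat n)) := by decide

theorem encrytor_step_eq (c : Char) (h : c.toNat < 256) :
    encrytorStepA c = String.ofList (encrytorStepB c) := by
  have := encrytor_step_eq_ofNat c.toNat h
  simpa [Char.ofNat_toNat] using this

theorem encrytor_foldl_eq (l : List Char) (hl : ∀ c ∈ l, c.toNat < 256) (acc : String) :
    l.foldl (fun s i => s ++ encrytorStepA i) acc = acc ++ String.ofList (l.flatMap encrytorStepB) := by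
  induction l generalizing acc with
  | nil => simp
  | cons c t ih =>
    have hc : c.toNat < 256 := hl c (by simp)
    have ht : ∀ x ∈ t, x.toNat < 256 := fun x hx => hl x (by simp [hx])
    simp only [List.foldl_cons, List.flatMap_cons, ih ht]
    rw [encrytor_step_eq c hc, String.ofList_append, String.append_assoc]

-- ===== VERDICT (by name: the statement is the Claim_ definition above) =====
theorem encrytor_spec : Claim_equal_encrytor := by
  intro text hdom
  unfold Spec_encrytor encrytor encrytor_alt
  have hl : ∀ c ∈ text.toList, c.toNat < 256 := by
    intro c hc
    have := List.all_eq_true.mp hdom c hc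
    simp [pvDomChar] at this
    omega
  simpa using encrytor_foldl_eq text.toList hl ""
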